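-- pv_equiv track=rewrite | github.com/rlrs/dfm-sdg | sdg/packs/verifiable_reasoning/lightuppuzzle.py | _number_walls
-- ===== SOURCE A (Python) =====
-- def _number_walls(
--     board_grid: tuple[str, ...],
--     lamp_assignment: dict[str, int],
-- ) -> tuple[str, ...]:
--     rows = len(board_grid)
--     cols = len(board_grid[0])
--     rendered: list[str] = []
--     for row, line in enumerate(board_grid):
--         chars: list[str] = []
--         for col, cell in enumerate(line):
--             if cell != "#":
--                 chars.append(cell)
--                 continue
--             adjacent_lamps = sum(
--                 lamp_assignment.get(f"r{next_row}c{next_col}", 0)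
--                 for next_row, next_col in _neighbors(row, col, rows, cols)
--             )
--             chars.append(str(adjacent_lamps))
--         rendered.append("".join(chars))
--     return tuple(rendered)
--
-- def _neighbors(row: int, col: int, rows: int, cols: int) -> tuple[tuple[int, int], ...]:
--     neighbors: list[tuple[int, int]] = []
--     for next_row, next_col in (
--         (row - 1, col),
--         (row + 1, col),
--         (row, col - 1),
--         (row, col + 1),
--     ):
--         if 0 <= next_row < rows and 0 <= next_col < cols:
--             neighbors.append((next_row, next_col))
--     return tuple(neighbors)
-- ===== SOURCE B (Python) =====
-- def _number_walls(board_grid, lamp_assignment):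
--     rows = len(board_grid)
--     cols = len(board_grid[0])
--     counts = {}
--     for r in range(rows):
--         for c in range(cols):
--             v = lamp_assignment.get(f"r{r}c{c}", 0)
--             for nb in ((r - 1, c), (r + 1, c), (r, c - 1), (r, c + 1)):
--                 counts[nb] = counts.get(nb, 0) + v
--     rendered = []
--     for r, line in enumerate(board_grid):
--         rendered.append("".join(
--             str(counts.get((r, c), 0)) if ch == "#" else ch
--             for c, ch in enumerate(line)
--         ))
--     return tuple(rendered)
-- ===== Notes on version B (the rewrite author's own statement) =====
-- stated objective: alternative
-- what changed: Replaces the per-wall gather (summing lamp values over each wall's in-grid neighbours) by a single scatter pass that adds each grid cell's lamp value to a counts dictionary at its four neighbours, then renders walls from that dictionary.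
import Mathlib
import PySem

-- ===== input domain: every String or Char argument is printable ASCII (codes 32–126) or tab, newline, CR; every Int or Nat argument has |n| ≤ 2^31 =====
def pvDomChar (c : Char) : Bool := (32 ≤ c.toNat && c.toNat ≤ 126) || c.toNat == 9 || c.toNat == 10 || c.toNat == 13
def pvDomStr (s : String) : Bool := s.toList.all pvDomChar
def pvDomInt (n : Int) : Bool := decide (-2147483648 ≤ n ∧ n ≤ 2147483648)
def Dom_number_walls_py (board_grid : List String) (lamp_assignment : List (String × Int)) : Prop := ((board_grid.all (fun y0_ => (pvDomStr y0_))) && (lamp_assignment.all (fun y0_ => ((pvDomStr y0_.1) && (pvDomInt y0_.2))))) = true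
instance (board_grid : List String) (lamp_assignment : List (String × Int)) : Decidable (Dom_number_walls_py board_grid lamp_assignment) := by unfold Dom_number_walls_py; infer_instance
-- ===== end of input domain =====

-- B replaces the per-wall gather over in-grid neighbours by one scatter pass: each grid
-- cell's lamp value is added to the counts of its four neighbours, then walls are rendered
-- from the counts dictionary (objective: alternative decomposition, same cost).

-- ===== PORT A =====
-- f"r{row}c{col}" (used identically by both Pythons)
def nwKey (r c : Int) : String := "r" ++ PySem.Int.toStr r ++ "c" ++ PySem.Int.toStr c

-- lamp_assignment.get(f"r{r}c{c}", 0) (used identically by both Pythons)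
def nwGet (la : List (String × Int)) (r c : Int) : Int :=
  PySem.Dict.getD (PySem.Dict.mk la) (nwKey r c) 0

-- _neighbors(row, col, rows, cols)
def nwNeighbors (row col rows cols : Int) : List (Int × Int) :=
  ([(row - 1, col), (row + 1, col), (row, col - 1), (row, col + 1)] : List (Int × Int)).filter
    (fun p => decide (0 ≤ p.1 ∧ p.1 < rows ∧ 0 ≤ p.2 ∧ p.2 < cols))

def number_walls_py (board_grid : List String) (lamp_assignment : List (String × Int)) : List String :=
  let rows : Int := PySem.List.len board_grid
  -- board_grid[0]: Python raises IndexError on an empty board; Pre_ excludes it, headD is exact elsewhere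
  let cols : Int := PySem.Str.len (board_grid.headD "")
  (PySem.List.enumerate board_grid 0).map (fun rl =>
    String.ofList ((PySem.List.enumerate rl.2.toList 0).flatMap (fun cc =>
      if cc.2 ≠ '#' then [cc.2]
      else
        (PySem.Int.toStr
          (((nwNeighbors rl.1 cc.1 rows cols).map (fun p => nwGet lamp_assignment p.1 p.2)).sum)).toList)))

-- ===== PORT B =====
-- the inner loop of Source B: scatter the lamp value of cell p onto its four neighbours
def nwScatter (la : List (String × Int)) (d : PySem.Dict (Int × Int) Int) (p : Int × Int) :
    PySem.Dict (Int × Int) Int :=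
  let v := nwGet la p.1 p.2
  ([(p.1 - 1, p.2), (p.1 + 1, p.2), (p.1, p.2 - 1), (p.1, p.2 + 1)] : List (Int × Int)).foldl
    (fun d n => d.insert n (d.getD n 0 + v)) d

def number_walls_py_alt (board_grid : List String) (lamp_assignment : List (String × Int)) : List String :=
  let rows : Int := PySem.List.len board_grid
  -- board_grid[0]: raises on an empty board exactly as A does; Pre_ excludes it
  let cols : Int := PySem.Str.len (board_grid.headD "")
  let counts : PySem.Dict (Int × Int) Int :=
    (PySem.List.pyRange 0 rows 1).foldl (fun d r =>
      (PySem.List.pyRange 0 cols 1).foldl (fun d c => nwScatter lamp_assignment d (r, c)) d)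
      PySem.Dict.empty
  (PySem.List.enumerate board_grid 0).map (fun rl =>
    String.ofList ((PySem.List.enumerate rl.2.toList 0).flatMap (fun cc =>
      if cc.2 = '#' then (PySem.Int.toStr (counts.getD (rl.1, cc.1) 0)).toList
      else [cc.2])))

-- ===== PRECONDITION & SPEC =====
-- Pre_ excludes only the empty board, on which both Pythons raise IndexError at board_grid[0].
def Pre_number_walls_py (board_grid : List String) (lamp_assignment : List (String × Int)) : Prop :=
  board_grid ≠ []
instance (board_grid : List String) (lamp_assignment : List (String × Int)) : Decidable (Pre_number_walls_py board_grid lamp_assignment) := by unfold Pre_number_walls_py; infer_instance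

def pvWitness_number_walls_py : List String × (List (String × Int)) :=
  (["#.", ".#"], [("r0c1", 2), ("r1c0", 1)])

def Spec_number_walls_py (board_grid : List String) (lamp_assignment : List (String × Int)) (out : List String) : Prop := out = number_walls_py_alt board_grid lamp_assignment
instance (board_grid : List String) (lamp_assignment : List (String × Int)) (out : List String) : Decidable (Spec_number_walls_py board_grid lamp_assignment out) := by unfold Spec_number_walls_py; infer_instance

-- ===== CLAIM (what is proved, stated in full; the proofs are below) =====
def Claim_equal_number_walls_py : Prop := ∀ (board_grid : List String) (lamp_assignment : List (String × Int)), Dom_number_walls_py board_grid lamp_assignment → Pre_number_walls_py board_grid lamp_assignment → Spec_number_walls_py board_grid lamp_assignment (number_walls_py board_grid lamp_assignment)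

-- ===== LEMMAS AND PROOFS =====

-- the four (unbounded) neighbour positions of a cell; nwScatter folds over exactly this list
def nwNbrs4 (p : Int × Int) : List (Int × Int) :=
  [(p.1 - 1, p.2), (p.1 + 1, p.2), (p.1, p.2 - 1), (p.1, p.2 + 1)]

-- the row-major list of in-grid cells B's two range loops traverse
def nwCells (rows cols : Int) : List (Int × Int) :=
  (PySem.List.pyRange 0 rows 1).flatMap (fun r => (PySem.List.pyRange 0 cols 1).map (fun c => (r, c)))

-- B's innermost loop: inserting `getD n 0 + v` along ns adds v once per occurrence of w in ns
theorem nw_inner (ns : List (Int × Int)) (d : PySem.Dict (Int × Int) Int) (v : Int) (w : Int × Int) :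
    (ns.foldl (fun d n => d.insert n (d.getD n 0 + v)) d).getD w 0
      = d.getD w 0 + v * ns.count w := by
  induction ns generalizing d with
  | nil => simp
  | cons n t ih =>
    simp only [List.foldl_cons, ih, PySem.Dict.getD_insert, List.count_cons]
    by_cases h : w = n
    · subst h; simp; ring
    · have : (n == w) = false := by simp; exact fun e => h e.symm
      simp [h, this]

-- B's scatter pass over any cell list, read back at w
theorem nw_scatter_fold (la : List (String × Int)) (cells : List (Int × Int))
    (d : PySem.Dict (Int × Int) Int) (w : Int × Int) :
    ((cells.foldl (fun d p => nwScatter la d p) d).getD w 0)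
      = d.getD w 0 + (cells.map (fun p => nwGet la p.1 p.2 * ((nwNbrs4 p).count w : Int))).sum := by
  induction cells generalizing d with
  | nil => simp
  | cons p t ih =>
    simp only [List.foldl_cons, ih, List.map_cons, List.sum_cons]
    rw [show nwScatter la d p = (nwNbrs4 p).foldl (fun d n => d.insert n (d.getD n 0 + nwGet la p.1 p.2)) d from rfl,
        nw_inner]
    ring

theorem nw_count4 (p w : Int × Int) : ((nwNbrs4 p).count w : Int) = if w ∈ nwNbrs4 p then 1 else 0 := by
  rcases p with ⟨a, b⟩; rcases w with ⟨x, y⟩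
  simp only [nwNbrs4, List.count_cons, List.count_nil, List.mem_cons, List.not_mem_nil,
    or_false, Prod.mk.injEq, beq_iff_eq]
  split_ifs <;> simp_all <;> omega

-- adjacency is symmetric: scattering from p reaches w iff gathering at w reads p
theorem nw_sym (p w : Int × Int) : w ∈ nwNbrs4 p ↔ p ∈ nwNbrs4 w := by
  rcases p with ⟨a, b⟩; rcases w with ⟨x, y⟩
  simp only [nwNbrs4, List.mem_cons, List.not_mem_nil, or_false, Prod.mk.injEq]
  omega

theorem nw_nodup4 (w : Int × Int) : (nwNbrs4 w).Nodup := by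
  rcases w with ⟨x, y⟩
  simp [nwNbrs4, Prod.mk.injEq]
  omega

theorem nw_cells_nodup (rows cols : Int) : (nwCells rows cols).Nodup := by
  rw [nwCells, List.nodup_flatMap]
  constructor
  · intro r _
    exact (PySem.List.nodup_pyRange_one _ _).map (fun c c' h => by cases h; rfl)
  · refine (PySem.List.nodup_pyRange_one 0 rows).imp ?_
    intro a b hne x hx hx'
    simp only [List.mem_map] at hx hx'
    obtain ⟨c, -, rfl⟩ := hx
    obtain ⟨c', -, h⟩ := hx'
    exact hne (by cases h; rfl)

theorem nw_mem_cells (rows cols : Int) (p : Int × Int) :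
    p ∈ nwCells rows cols ↔ (0 ≤ p.1 ∧ p.1 < rows ∧ 0 ≤ p.2 ∧ p.2 < cols) := by
  rcases p with ⟨a, b⟩
  simp [nwCells, List.mem_flatMap, PySem.List.mem_pyRange_one]
  aesop

-- B's nested range loops are the single scatter pass over nwCells
theorem nw_flatten (la : List (String × Int)) (rows cols : Int) (d0 : PySem.Dict (Int × Int) Int) :
    (PySem.List.pyRange 0 rows 1).foldl (fun d r =>
        (PySem.List.pyRange 0 cols 1).foldl (fun d c => nwScatter la d (r, c)) d) d0
      = (nwCells rows cols).foldl (fun d p => nwScatter la d p) d0 := by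
  rw [nwCells, List.foldl_flatMap]
  apply PySem.List.foldl_congr_mem
  intro d r _; rw [List.foldl_map]

theorem nw_sum_ite_filter (l : List (Int × Int)) (f : Int × Int → Int) (S : List (Int × Int)) :
    (l.map (fun p => if p ∈ S then f p else 0)).sum = ((l.filter (fun p => decide (p ∈ S))).map f).sum := by
  induction l with
  | nil => rfl
  | cons a t ih => by_cases h : a ∈ S <;> simp [h, ih]

-- the value B renders at a wall w is exactly A's gathered neighbour sum
theorem nw_counts_getD (la : List (String × Int)) (rows cols : Int) (w : Int × Int) :
    (((PySem.List.pyRange 0 rows 1).foldl (fun d r =>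
        (PySem.List.pyRange 0 cols 1).foldl (fun d c => nwScatter la d (r, c)) d)
        (PySem.Dict.empty)).getD w 0)
      = ((nwNeighbors w.1 w.2 rows cols).map (fun p => nwGet la p.1 p.2)).sum := by
  rw [nw_flatten, nw_scatter_fold, PySem.Dict.getD_empty, zero_add]
  have h1 : ((nwCells rows cols).map (fun p => nwGet la p.1 p.2 * ((nwNbrs4 p).count w : Int)))
      = ((nwCells rows cols).map (fun p => if p ∈ nwNbrs4 w then nwGet la p.1 p.2 else 0)) := by
    apply List.map_congr_left
    intro p _
    rw [nw_count4]
    by_cases h : w ∈ nwNbrs4 p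
    · rw [if_pos h, mul_one, if_pos ((nw_sym p w).mp h)]
    · rw [if_neg h, mul_zero, if_neg (fun hc => h ((nw_sym p w).mpr hc))]
  rw [h1, nw_sum_ite_filter]
  have h2 : ((((nwCells rows cols).filter (fun p => decide (p ∈ nwNbrs4 w))).map (fun p => nwGet la p.1 p.2)).sum)
      = ((((nwNbrs4 w).filter (fun p => decide (p ∈ nwCells rows cols))).map (fun p => nwGet la p.1 p.2)).sum) := by
    apply List.Perm.sum_eq; apply List.Perm.map
    rw [List.perm_ext_iff_of_nodup ((nw_cells_nodup rows cols).filter _) ((nw_nodup4 w).filter _)]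
    intro a; simp only [List.mem_filter, decide_eq_true_eq]; exact and_comm
  rw [h2]
  have h3 : ((nwNbrs4 w).filter (fun p => decide (p ∈ nwCells rows cols)))
      = nwNeighbors w.1 w.2 rows cols := by
    have : nwNeighbors w.1 w.2 rows cols
        = (nwNbrs4 w).filter (fun p => decide (0 ≤ p.1 ∧ p.1 < rows ∧ 0 ≤ p.2 ∧ p.2 < cols)) := rfl
    rw [this]
    apply List.filter_congr
    intro p _
    simp [nw_mem_cells]
  rw [h3]

-- ===== VERDICT (by name: the statement is the Claim_ definition above) =====
theorem number_walls_py_spec : Claim_equal_number_walls_py := by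
  intro bg la _ _
  show number_walls_py bg la = number_walls_py_alt bg la
  simp only [number_walls_py, number_walls_py_alt]
  apply List.map_congr_left
  intro rl _
  congr 1
  have : (fun cc : Int × Char =>
      if cc.2 ≠ '#' then [cc.2]
      else (PySem.Int.toStr
        (((nwNeighbors rl.1 cc.1 (PySem.List.len bg) (PySem.Str.len (bg.headD ""))).map
          (fun p => nwGet la p.1 p.2)).sum)).toList)
      = (fun cc : Int × Char =>
      if cc.2 = '#' then
        (PySem.Int.toStr
          ((((PySem.List.pyRange 0 (PySem.List.len bg) 1).foldl (fun d r =>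
              (PySem.List.pyRange 0 (PySem.Str.len (bg.headD "")) 1).foldl
                (fun d c => nwScatter la d (r, c)) d) PySem.Dict.empty).getD (rl.1, cc.1) 0))).toList
      else [cc.2]) := by
    funext cc
    by_cases h : cc.2 = '#'
    · rw [if_neg (by simp [h]), if_pos h, nw_counts_getD]
    · rw [if_pos h, if_neg h]
  rw [this]
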